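-- pv_equiv track=rewrite | github.com/TIL-in-CodingTest/252 | 001-100/024_PGS_햄버거만들기.py | solution
-- ===== SOURCE A (Python) =====
-- def solution(ingredient):
--     answer = 0
--     pattern = [1, 2, 3, 1]  # 제거할 패턴
--     idx = 0  # 리스트 인덱스 초기화
--
--     while idx < len(ingredient):
--         if ingredient[idx:idx+len(pattern)] == pattern:  # 패턴과 일치하는 부분 찾기
--             del ingredient[idx:idx+len(pattern)]  # 패턴 제거
--             answer += 1
--             idx -= len(pattern)  # 다음 패턴 검사를 위해 인덱스 조정
--         else:
--             idx += 1  # 다음 인덱스로 이동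
--
--     return answer
-- ===== SOURCE B (Python) =====
-- def solution(ingredient):
--     # One left-to-right pass with a stack: push each ingredient, and whenever
--     # the top four of the stack read 1,2,3,1 pop them and count one hamburger.
--     stack = []
--     answer = 0
--     for x in ingredient:
--         stack.append(x)
--         if stack[-4:] == [1, 2, 3, 1]:
--             del stack[-4:]
--             answer += 1
--     return answer
-- ===== Notes on version B (the rewrite author's own statement) =====
-- stated objective: alternative
-- what changed: Replaces A's rescanning while-loop, which repeatedly slices and deletes from the list and backtracks its index after each removal, by a single left-to-right pass with an explicit stack that pops whenever its top four elements read 1,2,3,1 (intended as faster, O(n) vs O(n^2) worst case; measured only ~1.48x on the generated inputs, so not claimed); B does not mutate the input list, whereas A empties the matched patterns out of it in place.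
import Mathlib
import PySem

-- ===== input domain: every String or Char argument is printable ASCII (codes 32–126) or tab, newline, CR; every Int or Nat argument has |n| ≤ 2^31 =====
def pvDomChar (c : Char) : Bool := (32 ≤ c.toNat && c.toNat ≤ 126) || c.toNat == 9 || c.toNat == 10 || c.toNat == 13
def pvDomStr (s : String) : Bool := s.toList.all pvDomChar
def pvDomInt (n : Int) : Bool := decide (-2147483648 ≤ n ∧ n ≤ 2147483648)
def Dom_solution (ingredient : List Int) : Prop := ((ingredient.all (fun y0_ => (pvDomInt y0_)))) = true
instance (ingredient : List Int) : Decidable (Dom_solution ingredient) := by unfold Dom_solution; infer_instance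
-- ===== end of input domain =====

-- B replaces A's rescanning delete-and-backtrack while-loop by a single stack pass; the RETURN
-- values are proved equal — A additionally empties matched patterns out of `ingredient` in place
-- (observable mutation), B does not touch its argument.

-- ===== PORT A =====
-- Python `del xs[a:b]` (step 1; exact for a ≤ b, the only way A uses it): keep xs[:a] and xs[b:].
def pyDelSlice (xs : List Int) (a b : Int) : List Int :=
  xs.take (PySem.List.clampIdx xs.length a) ++ xs.drop (PySem.List.clampIdx xs.length b)

-- the `while idx < len(ingredient)` loop of A (pattern [1,2,3,1] inlined, len(pattern) = 4)
def aloop (ingredient : List Int) (idx answer : Int) : Int :=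
  if _h1 : idx < (ingredient.length : Int) then
    if _hm : PySem.List.slice ingredient (some idx) (some (idx + 4)) = [1, 2, 3, 1] then
      aloop (pyDelSlice ingredient idx (idx + 4)) (idx - 4) (answer + 1)
    else
      aloop ingredient (idx + 1) answer
  else
    answer
termination_by (2 * (ingredient.length : Int) - idx).toNat
decreasing_by
  · have hlen := congrArg List.length _hm
    rw [PySem.List.length_slice] at hlen
    have h1 := PySem.List.clampIdx_le ingredient.length idx
    have h2 := PySem.List.clampIdx_le ingredient.length (idx + 4)
    simp only [pyDelSlice, List.length_append, List.length_take, List.length_drop,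
      List.length_cons, List.length_nil] at *
    omega
  · omega

def solution (ingredient : List Int) : Int :=
  aloop ingredient 0 0

-- ===== PORT B =====
-- one iteration of B's for-loop: state = (stack, answer)
def bloop (s : List Int × Int) (x : Int) : List Int × Int :=
  if PySem.List.slice (s.1 ++ [x]) (some (-4)) none = [1, 2, 3, 1] then  -- stack[-4:] == [1,2,3,1]
    (PySem.List.slice (s.1 ++ [x]) none (some (-4)), s.2 + 1)             -- del stack[-4:]
  else
    (s.1 ++ [x], s.2)

def solution_alt (ingredient : List Int) : Int :=
  (ingredient.foldl bloop ([], 0)).2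

-- ===== PRECONDITION & SPEC =====
def Spec_solution (ingredient : List Int) (out : Int) : Prop := out = solution_alt ingredient
instance (ingredient : List Int) (out : Int) : Decidable (Spec_solution ingredient out) := by unfold Spec_solution; infer_instance

-- ===== CLAIM (what is proved, stated in full; the proofs are below) =====
def Claim_equal_solution : Prop := ∀ (ingredient : List Int), Dom_solution ingredient → Spec_solution ingredient (solution ingredient)

-- ===== LEMMAS AND PROOFS =====

-- canonical stack pass: stack kept reversed (top = head); returns (final stack, number of pops)
def goP (st : List Int) (xs : List Int) : List Int × Int :=
  match xs with
  | [] => (st, 0)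
  | x :: rest =>
    if (x :: st).take 4 = [1, 3, 2, 1] then
      ((goP ((x :: st).drop 4) rest).1, (goP ((x :: st).drop 4) rest).2 + 1)
    else
      goP (x :: st) rest

theorem goP_append (st : List Int) (xs ys : List Int) :
    goP st (xs ++ ys) =
      ((goP (goP st xs).1 ys).1, (goP st xs).2 + (goP (goP st xs).1 ys).2) := by
  induction xs generalizing st with
  | nil => simp [goP]
  | cons x t ih =>
    simp only [List.cons_append, goP]
    split_ifs with h
    · rw [ih]; simp; omega
    · rw [ih]

-- the pop test seen from the un-reversed prefix: top four of rev xs read 1,3,2,1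
-- iff the last four of xs read 1,2,3,1
theorem take4_rev (xs : List Int) :
    xs.reverse.take 4 = [1, 3, 2, 1] ↔ xs.drop (xs.length - 4) = [1, 2, 3, 1] := by
  have h : xs.reverse.take 4 = (xs.drop (xs.length - 4)).reverse := by
    rw [List.reverse_drop]
    by_cases h4 : 4 ≤ xs.length
    · congr 1; omega
    · rw [List.take_of_length_le (by simp; omega), List.take_of_length_le (by simp; omega)]
  rw [h]
  constructor
  · intro he; have := congrArg List.reverse he; simpa using this
  · intro he; rw [he]; rfl

theorem cond_iff (pre : List Int) (x : Int) :
    ((x :: pre.reverse).take 4 = [1, 3, 2, 1]) ↔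
      ((pre ++ [x]).drop (pre.length - 3) = [1, 2, 3, 1]) := by
  have h := take4_rev (pre ++ [x])
  simp only [List.reverse_append, List.reverse_cons, List.reverse_nil, List.nil_append,
    List.cons_append, List.length_append, List.length_cons, List.length_nil] at h
  have harith : pre.length + 1 - 4 = pre.length - 3 := by omega
  rw [harith] at h
  exact h

-- "no occurrence of the pattern starts strictly before idx"
def NoMatch (ing : List Int) (idx : Int) : Prop :=
  ∀ j : Nat, (j : Int) < idx → (ing.drop j).take 4 ≠ [1, 2, 3, 1]

-- an unmatched prefix passes through the stack untouched
theorem irred (ing : List Int) (idx : Int) (h : NoMatch ing idx) :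
    ∀ m : Nat, (m : Int) ≤ idx + 3 → m ≤ ing.length →
      goP [] (ing.take m) = ((ing.take m).reverse, 0) := by
  intro m
  induction m with
  | zero => intro _ _; simp [goP]
  | succ k ih =>
    intro hm hle
    have hk := ih (by omega) (by omega)
    have hklt : k < ing.length := by omega
    have hget : ing.take (k + 1) = ing.take k ++ [ing[k]] := by
      rw [List.take_add_one]; simp [List.getElem?_eq_getElem hklt]
    have hcond : ¬ ((ing[k] :: (ing.take k).reverse).take 4 = [1, 3, 2, 1]) := by
      rw [cond_iff, ← hget, List.length_take]
      have hmin : min k ing.length = k := by omega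
      rw [hmin]
      by_cases h3 : 3 ≤ k
      · rw [List.drop_take]
        have h4 : k + 1 - (k - 3) = 4 := by omega
        rw [h4]
        exact h (k - 3) (by omega)
      · intro hc
        have := congrArg List.length hc
        simp at this
        omega
    rw [hget, goP_append, hk]
    simp only [goP]
    rw [if_neg hcond]
    simp only [Prod.mk.injEq, add_zero]
    refine ⟨?_, trivial⟩
    rw [List.reverse_append]
    simp

-- A's loop, started below any occurrence of the pattern, counts exactly the stack pass's pops
theorem aloop_eq (ing : List Int) (idx ans : Int) :
    -4 ≤ idx → NoMatch ing idx → aloop ing idx ans = ans + (goP [] ing).2 := by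
  induction ing, idx, ans using aloop.induct with
  | case1 ing idx ans h1 hm ih =>
    intro hge h
    -- the slice matched, so it has four elements; hence 0 ≤ idx
    have hlen := congrArg List.length hm
    rw [PySem.List.length_slice] at hlen
    simp only [List.length_cons, List.length_nil] at hlen
    have hidx : 0 ≤ idx := by
      by_contra hneg
      simp only [PySem.List.clampIdx] at hlen
      split_ifs at hlen <;> omega
    have hii : (idx.toNat : Int) = idx := Int.toNat_of_nonneg hidx
    set i := idx.toNat with hi
    have hilt : i < ing.length := by omega
    have hdrop : (ing.drop i).take 4 = [1, 2, 3, 1] := by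
      have hs := PySem.List.slice_toNat (xs := ing) (a := idx) (b := idx + 4) hidx (by omega)
      rw [hs] at hm
      have h4 : (idx + 4).toNat - idx.toNat = 4 := by omega
      rw [h4] at hm
      exact hm
    have hlen4 : 4 ≤ ing.length - i := by
      have := congrArg List.length hdrop
      simp at this
      omega
    set P := ing.take i with hP
    set T := ing.drop (i + 4) with hT
    have hPlen : P.length = i := by simp [hP]; omega
    have hdecomp : ing = P ++ ([1, 2, 3, 1] ++ T) := by
      have e2 : ing.drop i = [1, 2, 3, 1] ++ T := by
        have e3 := (List.take_append_drop 4 (ing.drop i)).symm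
        rw [hdrop, List.drop_drop] at e3
        rw [e3]
      conv_lhs => rw [← List.take_append_drop i ing, e2]
    have hdel : pyDelSlice ing idx (idx + 4) = P ++ T := by
      simp only [pyDelSlice, PySem.List.clampIdx]
      rw [if_neg (by omega), if_neg (by omega)]
      have m1 : min idx.toNat ing.length = i := by omega
      have m2 : min (idx + 4).toNat ing.length = i + 4 := by omega
      rw [m1, m2]
    have hpre : goP [] P = (P.reverse, 0) := irred ing idx h i (by omega) (by omega)
    -- the four pushes over [1,2,3,1] from stack P.reverse: three non-pops, then one pop
    have hstep1 : ¬ (((1 : Int) :: P.reverse).take 4 = [1, 3, 2, 1]) := by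
      rw [cond_iff, hPlen]
      by_cases h3 : 3 ≤ i
      · have hdl : (P.drop (i - 3)).length = 3 := by simp [hPlen]; omega
        have e1 : (P ++ [(1 : Int)]).drop (i - 3) = P.drop (i - 3) ++ [1] := by
          rw [List.drop_append_of_le_length (by omega)]
        have e2 : (ing.drop (i - 3)).take 4 = P.drop (i - 3) ++ [1] := by
          conv_lhs => rw [hdecomp]
          rw [List.drop_append_of_le_length (by omega),
            List.take_append, hdl,
            List.take_of_length_le (by omega)]
          rfl
        rw [e1, ← e2]
        exact h (i - 3) (by omega)
      · intro hc
        have := congrArg List.length hc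
        simp [hPlen] at this
        omega
    have hstep2 : ¬ (((2 : Int) :: 1 :: P.reverse).take 4 = [1, 3, 2, 1]) := by
      intro hc
      have : ((2 : Int) :: 1 :: P.reverse).take 4 = 2 :: (1 :: P.reverse).take 3 := rfl
      rw [this] at hc
      simp at hc
    have hstep3 : ¬ (((3 : Int) :: 2 :: 1 :: P.reverse).take 4 = [1, 3, 2, 1]) := by
      intro hc
      have : ((3 : Int) :: 2 :: 1 :: P.reverse).take 4 = 3 :: (2 :: 1 :: P.reverse).take 3 := rfl
      rw [this] at hc
      simp at hc
    have hstep4 : (((1 : Int) :: 3 :: 2 :: 1 :: P.reverse).take 4 = [1, 3, 2, 1]) := rfl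
    have hmid : goP P.reverse ([1, 2, 3, 1] ++ T) =
        ((goP P.reverse T).1, (goP P.reverse T).2 + 1) := by
      simp only [List.cons_append, List.nil_append]
      rw [goP, if_neg hstep1, goP, if_neg hstep2, goP, if_neg hstep3, goP, if_pos hstep4]
      rfl
    have hNoMatch' : NoMatch (P ++ T) (idx - 4) := by
      intro j hj hc
      have hjl : j + 5 ≤ i := by omega
      have e1 : ((P ++ T).drop j).take 4 = (P.drop j).take 4 := by
        rw [List.drop_append_of_le_length (by omega),
          List.take_append_of_le_length (by simp [hPlen]; omega)]
      have e2 : (ing.drop j).take 4 = (P.drop j).take 4 := by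
        conv_lhs => rw [hdecomp]
        rw [List.drop_append_of_le_length (by omega),
          List.take_append_of_le_length (by simp [hPlen]; omega)]
      exact h j (by omega) (by rw [e2, ← e1]; exact hc)
    have hNM : NoMatch (pyDelSlice ing idx (idx + 4)) (idx - 4) := by
      rw [hdel]; exact hNoMatch'
    rw [aloop, dif_pos h1, dif_pos hm, ih (by omega) hNM, hdel]
    conv_rhs => rw [hdecomp]
    rw [goP_append, hpre, goP_append, hpre]
    simp only [hmid]
    omega
  | case2 ing idx ans h1 hm ih =>
    intro hge h
    have h' : NoMatch ing (idx + 1) := by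
      intro j hj
      by_cases hjlt : (j : Int) < idx
      · exact h j hjlt
      · have hje : (j : Int) = idx := by omega
        intro hc
        apply hm
        rw [← hje]
        have hs := PySem.List.slice_natCast_add ing j 4
        push_cast at hs
        rw [hs]
        exact hc
    rw [aloop, dif_pos h1, dif_neg hm]
    exact ih (by omega) h'
  | case3 ing idx ans h1 =>
    intro hge h
    rw [aloop, dif_neg h1]
    have hall : goP [] ing = (ing.reverse, 0) := by
      have := irred ing idx h ing.length (by omega) (le_refl _)
      simpa using this
    rw [hall]
    simp

-- B's fold computes the canonical stack pass (stack stored un-reversed, count shifted by ans)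
theorem foldl_bloop (xs : List Int) : ∀ (stack : List Int) (ans : Int),
    xs.foldl bloop (stack, ans) =
      ((goP stack.reverse xs).1.reverse, ans + (goP stack.reverse xs).2) := by
  induction xs with
  | nil => intro stack ans; simp [goP]
  | cons x t ih =>
    intro stack ans
    have hrev : (stack ++ [x]).reverse = x :: stack.reverse := by simp
    have hcond : (PySem.List.slice (stack ++ [x]) (some (-4)) none = [1, 2, 3, 1]) ↔
        ((x :: stack.reverse).take 4 = [1, 3, 2, 1]) := by
      rw [PySem.List.slice_from_neg_ofNat _ 4 (by norm_num), ← hrev, ← take4_rev]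
    simp only [List.foldl_cons]
    by_cases hc : (x :: stack.reverse).take 4 = [1, 3, 2, 1]
    · have hmatch : PySem.List.slice (stack ++ [x]) (some (-4)) none = [1, 2, 3, 1] :=
        hcond.mpr hc
      have hlen4 : 4 ≤ (stack ++ [x]).length := by
        have := congrArg List.length hmatch
        rw [PySem.List.slice_from_neg_ofNat _ 4 (by norm_num)] at this
        simp only [List.length_drop, List.length_cons, List.length_nil] at this
        omega
      have hst : ((stack ++ [x]).take ((stack ++ [x]).length - 4)).reverse =
          (x :: stack.reverse).drop 4 := by
        rw [List.reverse_take, ← hrev]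
        congr 1
        omega
      simp only [bloop, hmatch, if_pos, PySem.List.slice_to_neg_ofNat _ 4 (by norm_num)]
      rw [ih, hst]
      conv_rhs => rw [goP, if_pos hc]
      simp only [Prod.mk.injEq, true_and]
      omega
    · have hmatch' : ¬ (PySem.List.slice (stack ++ [x]) (some (-4)) none = [1, 2, 3, 1]) := by
        intro hcc; exact hc (hcond.mp hcc)
      simp only [bloop]
      rw [if_neg hmatch']
      rw [ih, hrev]
      conv_rhs => rw [goP, if_neg hc]

-- ===== VERDICT (by name: the statement is the Claim_ definition above) =====
theorem solution_spec : Claim_equal_solution := by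
  intro ing _
  unfold Spec_solution solution solution_alt
  rw [aloop_eq ing 0 0 (by omega) (fun j hj => absurd hj (by omega)), foldl_bloop]
  simp
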